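-- pv_equiv track=rewrite | github.com/kingmaker-presentation-helper/Presentation_Helper | extract_keyword.py | delete_included_word2
-- ===== SOURCE A (Python) =====
-- def list_be_unique(my_list):
--     unique_list = []
--     for item in my_list:
--         if item not in unique_list:
--             unique_list.append(item)
--     return unique_list
--
-- def delete_included_word2(keyword_list):
--     keyword_list = list_be_unique(keyword_list)
--     result_list = []
--     for keyword1 in keyword_list:
--         include = False
--         for keyword2 in keyword_list:
--             if keyword1 == keyword2:
--                 continue  # 같은 키워드는 무시하고 다음으로 넘어감
--             if keyword2 in keyword1:
--                 include = True
--                 break  # 포함되는 경우 반복문 종료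
--         if not include:
--             result_list.append(keyword1)
--     return result_list
-- ===== SOURCE B (Python) =====
-- def delete_included_word2(keyword_list):
--     # Dedup (first occurrences), then keep a keyword iff none of its proper
--     # substrings is itself a keyword (hash-set membership instead of scanning
--     # all other keywords for each keyword).
--     unique = list(dict.fromkeys(keyword_list))
--     kwset = set(unique)
--     result = []
--     for kw in unique:
--         n = len(kw)
--         if not any(kw[i:j] in kwset
--                    for i in range(n + 1)
--                    for j in range(i, n + 1)
--                    if j - i != n):
--             result.append(kw)
--     return result
-- ===== Notes on version B (the rewrite author's own statement) =====
-- stated objective: faster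
-- what changed: Instead of scanning all other keywords for each keyword (quadratic in the number of keywords), B builds a hash set of the deduplicated keywords once and keeps a keyword iff none of its proper substrings is in that set.
import Mathlib
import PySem

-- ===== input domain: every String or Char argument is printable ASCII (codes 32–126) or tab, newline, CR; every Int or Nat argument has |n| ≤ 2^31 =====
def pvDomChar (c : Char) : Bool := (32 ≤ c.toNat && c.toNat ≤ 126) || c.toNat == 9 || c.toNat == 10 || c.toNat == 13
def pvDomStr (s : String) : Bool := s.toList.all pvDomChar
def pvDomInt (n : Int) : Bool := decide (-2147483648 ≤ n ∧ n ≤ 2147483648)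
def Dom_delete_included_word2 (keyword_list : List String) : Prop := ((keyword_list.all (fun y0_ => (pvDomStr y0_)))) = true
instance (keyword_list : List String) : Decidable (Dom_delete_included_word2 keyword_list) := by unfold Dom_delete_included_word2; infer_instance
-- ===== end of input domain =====

-- B replaces A's scan of all other keywords per keyword by enumerating the proper
-- substrings of each keyword and testing membership in a set of all keywords: quadratic in keyword length instead of in the number of keywords (objective: faster).

-- ===== PORT A =====
def delete_included_word2 (keyword_list : List String) : List String :=
  -- list_be_unique: append each item not yet present
  let kl := keyword_list.foldl
    (fun acc item => if acc.contains item then acc else acc ++ [item]) ([] : List String)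
  kl.foldl (fun result_list keyword1 =>
    let include_ := kl.any (fun keyword2 =>
      !(keyword1 == keyword2) && PySem.Str.isIn keyword2 keyword1)
    if !include_ then result_list ++ [keyword1] else result_list) []

-- ===== PORT B =====
def delete_included_word2_alt (keyword_list : List String) : List String :=
  let unique := PySem.List.dedup keyword_list
  let kwset : PySem.Set String := PySem.Set.ofList unique
  unique.foldl (fun result kw =>
    let n : Int := PySem.Str.len kw
    let found := (PySem.List.pyRange 0 (n + 1) 1).any (fun i =>
      (PySem.List.pyRange i (n + 1) 1).any (fun j =>
        !(j - i == n) && kwset.contains (PySem.Str.slice kw (some i) (some j))))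
    if !found then result ++ [kw] else result) []

-- ===== PRECONDITION & SPEC =====
def Spec_delete_included_word2 (keyword_list : List String) (out : List String) : Prop := out = delete_included_word2_alt keyword_list
instance (keyword_list : List String) (out : List String) : Decidable (Spec_delete_included_word2 keyword_list out) := by unfold Spec_delete_included_word2; infer_instance

-- ===== CLAIM (what is proved, stated in full; the proofs are below) =====
def Claim_equal_delete_included_word2 : Prop := ∀ (keyword_list : List String), Dom_delete_included_word2 keyword_list → Spec_delete_included_word2 keyword_list (delete_included_word2 keyword_list)

-- ===== LEMMAS AND PROOFS =====

-- A's hand-written dedup loop is PySem's ordered dedup.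
lemma pv_uniq_eq (xs : List String) :
    xs.foldl (fun acc item => if acc.contains item then acc else acc ++ [item]) ([] : List String)
      = PySem.List.dedup xs := by
  rw [PySem.List.dedup_eq_ofList, PySem.Set.ofList_eq_foldl]
  rfl

-- congruence for the shared "keep kw unless p kw" fold
lemma pv_foldl_keep_congr (p q : String → Bool) :
    ∀ (l : List String) (acc : List String), (∀ x ∈ l, p x = q x) →
      l.foldl (fun r x => if !(p x) then r ++ [x] else r) acc
        = l.foldl (fun r x => if !(q x) then r ++ [x] else r) acc := by
  intro l
  induction l with
  | nil => intro acc _; rfl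
  | cons x xs ih =>
      intro acc h
      simp only [List.foldl_cons, h x (by simp)]
      exact ih _ (fun y hy => h y (by simp [hy]))

-- core: "some other keyword is a substring of kw" = "some proper slice of kw is a keyword"
lemma pv_cond_eq (u : List String) (kw : String) :
    u.any (fun keyword2 => !(kw == keyword2) && PySem.Str.isIn keyword2 kw)
      = (PySem.List.pyRange 0 (PySem.Str.len kw + 1) 1).any (fun i =>
          (PySem.List.pyRange i (PySem.Str.len kw + 1) 1).any (fun j =>
            !(j - i == PySem.Str.len kw)
              && (PySem.Set.ofList u).contains (PySem.Str.slice kw (some i) (some j)))) := by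
  rw [Bool.eq_iff_iff]
  simp only [List.any_eq_true, Bool.and_eq_true, Bool.not_eq_true', beq_eq_false_iff_ne,
    PySem.Str.isIn_iff_infix, PySem.List.mem_pyRange_one, PySem.Set.contains_iff,
    PySem.Set.mem_ofList, PySem.Str.len_eq, ne_eq]
  constructor
  · rintro ⟨kw2, hmem, hne, hinf⟩
    obtain ⟨s, t, hst⟩ := hinf
    have hlen : s.length + kw2.toList.length + t.length = kw.toList.length := by
      rw [← hst]; simp; omega
    have hLne : kw2.toList.length ≠ kw.toList.length := by
      intro h
      have hs : s.length = 0 := by omega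
      have ht : t.length = 0 := by omega
      apply hne
      apply String.toList_inj.mp
      rw [← hst, List.eq_nil_of_length_eq_zero hs, List.eq_nil_of_length_eq_zero ht]
      simp
    refine ⟨(s.length : Int), ⟨by positivity, by omega⟩,
           ⟨((s.length + kw2.toList.length : Nat) : Int), ⟨by push_cast; omega, by push_cast; omega⟩,
           ⟨by push_cast; omega, ?_⟩⟩⟩
    have hslice : (PySem.Str.slice kw (some (s.length : Int))
        (some ((s.length + kw2.toList.length : Nat) : Int))).toList = kw2.toList := by
      rw [PySem.Str.toList_slice, PySem.Chars.slice_eq_listSlice, PySem.List.slice_natCast]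
      rw [← hst]
      rw [List.append_assoc, List.drop_left, Nat.add_sub_cancel_left, List.take_left]
    rw [String.toList_inj.mp hslice]; exact hmem
  · rintro ⟨i, ⟨h0i, hi⟩, j, ⟨hij, hj⟩, hne, hmem⟩
    set a := i.toNat with ha
    set b := j.toNat with hb
    have hia : i = (a : Int) := (Int.toNat_of_nonneg h0i).symm
    have hjb : j = (b : Int) := (Int.toNat_of_nonneg (le_trans h0i hij)).symm
    have hab : a ≤ b := by omega
    have hbn : b ≤ kw.toList.length := by omega
    have hslice : (PySem.Str.slice kw (some i) (some j)).toList
        = (kw.toList.drop a).take (b - a) := by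
      rw [hia, hjb, PySem.Str.toList_slice, PySem.Chars.slice_eq_listSlice, PySem.List.slice_natCast]
    refine ⟨PySem.Str.slice kw (some i) (some j), hmem, ?_, ?_⟩
    · intro h
      apply hne
      have := congrArg (fun s : String => s.toList.length) h
      simp only [hslice] at this
      simp only [List.length_take, List.length_drop] at this
      omega
    · rw [hslice]
      refine ⟨kw.toList.take a, (kw.toList.drop a).drop (b - a), ?_⟩
      rw [List.append_assoc, List.take_append_drop, List.take_append_drop]

theorem pv_main (xs : List String) :
    delete_included_word2 xs = delete_included_word2_alt xs := by
  unfold delete_included_word2 delete_included_word2_alt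
  rw [pv_uniq_eq]
  exact pv_foldl_keep_congr _ _ _ _ (fun kw _ => pv_cond_eq _ kw)

-- ===== VERDICT (by name: the statement is the Claim_ definition above) =====
theorem delete_included_word2_spec : Claim_equal_delete_included_word2 := by
  intro xs _
  exact pv_main xs
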